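-- pv_equiv track=rewrite | github.com/alexandraback/datacollection | solutions_5634697451274240_0/Python/Jasonzhang/Revenge of the Pancakes.py | flip_most_top_happy_pancake
-- ===== SOURCE A (Python) =====
-- def flip_most_top_happy_pancake(pancake):
--     result = ''
--     for i in range(len(pancake)):
--         if pancake[i] == '+':
--             result += '-'
--         else:
--             result += pancake[i:]
--             return result
--     return result
-- ===== SOURCE B (Python) =====
-- def flip_most_top_happy_pancake(pancake):
--     k = len(pancake) - len(pancake.lstrip('+'))
--     return '-' * k + pancake[k:]
-- ===== Notes on version B (the rewrite author's own statement) =====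
-- stated objective: idiomatic
-- what changed: Replaces the per-character loop with running string concatenation and early return by computing the count of leading plus characters with lstrip, then one replicate and one slice.
import Mathlib
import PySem

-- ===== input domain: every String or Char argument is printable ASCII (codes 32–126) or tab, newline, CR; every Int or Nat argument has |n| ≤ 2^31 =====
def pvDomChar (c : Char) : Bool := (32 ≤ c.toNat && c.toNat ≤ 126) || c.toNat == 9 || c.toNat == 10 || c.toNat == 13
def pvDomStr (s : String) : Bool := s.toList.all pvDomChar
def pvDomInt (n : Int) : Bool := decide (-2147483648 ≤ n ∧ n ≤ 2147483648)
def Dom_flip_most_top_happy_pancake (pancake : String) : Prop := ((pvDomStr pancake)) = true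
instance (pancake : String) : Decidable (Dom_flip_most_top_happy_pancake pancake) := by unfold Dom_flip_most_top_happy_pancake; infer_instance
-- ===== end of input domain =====

-- B replaces A's per-character loop with running concatenation and early return
-- by an lstrip-computed count of leading '+' followed by one replicate and one slice (idiomatic).

-- ===== PORT A =====
-- A's loop: walk the characters; '+' appends '-' to the accumulator, anything
-- else appends the remaining suffix (pancake[i:] = c :: rest) and returns.
def pvALoop (acc : List Char) : List Char → List Char
  | [] => acc
  | c :: rest => if c = '+' then pvALoop (acc ++ ['-']) rest else acc ++ (c :: rest)

def flip_most_top_happy_pancake (pancake : String) : String :=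
  String.mk (pvALoop [] pancake.toList)

-- ===== PORT B =====
-- Source B: k = len(pancake) - len(pancake.lstrip('+')); return '-' * k + pancake[k:]
def flip_most_top_happy_pancake_alt (pancake : String) : String :=
  let cs := pancake.toList
  let k := cs.length - (cs.dropWhile (· = '+')).length  -- lstrip('+') = dropWhile; k ≥ 0
  String.mk (List.replicate k '-' ++ cs.drop k)          -- pancake[k:] with 0 ≤ k ≤ len

-- ===== PRECONDITION & SPEC =====
def Spec_flip_most_top_happy_pancake (pancake : String) (out : String) : Prop := out = flip_most_top_happy_pancake_alt pancake
instance (pancake : String) (out : String) : Decidable (Spec_flip_most_top_happy_pancake pancake out) := by unfold Spec_flip_most_top_happy_pancake; infer_instance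

-- ===== CLAIM (what is proved, stated in full; the proofs are below) =====
def Claim_equal_flip_most_top_happy_pancake : Prop := ∀ (pancake : String), Dom_flip_most_top_happy_pancake pancake → Spec_flip_most_top_happy_pancake pancake (flip_most_top_happy_pancake pancake)

-- ===== LEMMAS AND PROOFS =====

theorem pvALoop_eq (cs : List Char) : ∀ acc,
    pvALoop acc cs = acc ++ List.replicate (cs.takeWhile (· = '+')).length '-' ++ cs.dropWhile (· = '+') := by
  induction cs with
  | nil => intro acc; simp [pvALoop]
  | cons c rest ih =>
      intro acc
      by_cases h : c = '+'
      · simp [pvALoop, h, ih, List.replicate_succ]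
      · simp [pvALoop, h]

theorem pvDrop_takeWhile (p : Char → Bool) (cs : List Char) :
    cs.drop (cs.takeWhile p).length = cs.dropWhile p := by
  induction cs with
  | nil => simp
  | cons c rest ih =>
      by_cases h : p c <;> simp [List.takeWhile, List.dropWhile, h, ih]

theorem pvK_eq (cs : List Char) :
    cs.length - (cs.dropWhile (· = '+')).length = (cs.takeWhile (· = '+')).length := by
  have := List.takeWhile_append_dropWhile (p := (· = '+')) (l := cs)
  have hlen : (cs.takeWhile (· = '+')).length + (cs.dropWhile (· = '+')).length = cs.length := by
    conv_rhs => rw [← this]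
    rw [List.length_append]
  omega

-- ===== VERDICT (by name: the statement is the Claim_ definition above) =====
theorem flip_most_top_happy_pancake_spec : Claim_equal_flip_most_top_happy_pancake := by
  intro pancake _
  unfold Spec_flip_most_top_happy_pancake flip_most_top_happy_pancake flip_most_top_happy_pancake_alt
  simp only [pvALoop_eq, pvK_eq, pvDrop_takeWhile, List.nil_append]
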